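-- pv_equiv track=rewrite | github.com/mkorangestripe/programming | programming_techniques/various_examples.py | solution
-- ===== SOURCE A (Python) =====
-- def solution(a):
--     smallest = 0
--     a.sort()
--     if a[-1] <= 0:
--         return 1
--     for i in range(len(a)):
--         if a[i] - 1 <= 0:
--             continue
--         if a[i] == a[i-1]:
--             continue
--         if a[i] - 1 != a[i-1]:
--             smallest = a[i] - 1
--     if smallest == 0:
--         return a[-1] + 1
--     return smallest
-- ===== SOURCE B (Python) =====
-- def solution(a):
--     # Hash-set scan instead of sort-and-adjacent-compare; return value only
--     # (A sorts its argument in place, B leaves it untouched).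
--     s = set(a)
--     m = max(s)
--     if m <= 0:
--         return 1
--     cands = [v - 1 for v in s if v >= 2 and v - 1 not in s]
--     if len(s) == 1 or not cands:
--         return m + 1
--     return max(cands)
-- ===== Notes on version B (the rewrite author's own statement) =====
-- stated objective: alternative
-- what changed: Replaces sort + adjacent-pair scan (with wrap-around indexing) by a hash-set scan: the answer is the maximum of v-1 over distinct v>=2 whose predecessor v-1 is absent, with the single-distinct-value and max<=0 cases handled directly.
import Mathlib
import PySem

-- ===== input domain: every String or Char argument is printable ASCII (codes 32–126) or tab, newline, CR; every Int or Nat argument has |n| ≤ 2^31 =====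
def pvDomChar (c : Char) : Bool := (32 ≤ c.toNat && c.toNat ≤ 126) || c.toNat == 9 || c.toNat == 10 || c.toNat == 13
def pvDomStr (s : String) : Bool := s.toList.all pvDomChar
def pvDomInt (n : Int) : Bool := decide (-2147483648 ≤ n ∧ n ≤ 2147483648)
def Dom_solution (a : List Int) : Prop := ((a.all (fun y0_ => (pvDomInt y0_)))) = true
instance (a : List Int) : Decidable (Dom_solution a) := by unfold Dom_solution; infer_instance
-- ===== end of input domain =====

-- B replaces A's sort + adjacent-pair scan (with wrap-around indexing) by a hash-set candidate scan;
-- equivalence is about the RETURN value only: Python A sorts its argument in place, B does not.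

-- ===== PORT A =====
def solution (a : List Int) : Int :=
  let sa := PySem.List.sorted a (fun x => x) false
  match PySem.List.pyGet? sa (-1) with
  | none => 0   -- a = []: Python raises IndexError here (excluded by Pre_solution)
  | some last =>
    if last ≤ 0 then 1
    else
      let smallest := (PySem.List.pyRange 0 (sa.length : Int) 1).foldl
        (fun smallest i =>
          -- a[i] is pyGetD sa i; a[i-1] is pyGetD sa (i-1): at i = 0 it reads a[-1] (wrap-around)
          if PySem.List.pyGetD sa i 0 - 1 ≤ 0 then smallest
          else if PySem.List.pyGetD sa i 0 = PySem.List.pyGetD sa (i - 1) 0 then smallest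
          else if PySem.List.pyGetD sa i 0 - 1 ≠ PySem.List.pyGetD sa (i - 1) 0 then
            PySem.List.pyGetD sa i 0 - 1
          else smallest) 0
      if smallest = 0 then last + 1 else smallest

-- ===== PORT B =====
def solution_alt (a : List Int) : Int :=
  let s := PySem.Set.ofList a
  match PySem.List.max? s (fun x => x) with
  | none => 0   -- a = []: Python max(s) raises ValueError here (excluded by Pre_solution)
  | some m =>
    if m ≤ 0 then 1
    else
      let cands := (s.filter (fun v => decide (2 ≤ v) && !(PySem.Set.contains s (v - 1)))).map
        (fun v => v - 1)
      if s.length = 1 ∨ cands = [] then m + 1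
      else
        match PySem.List.max? cands (fun x => x) with
        | none => 0   -- unreachable: cands ≠ []
        | some c => c

-- ===== PRECONDITION & SPEC =====
-- Pre_ excludes only the empty list, on which A raises IndexError (a[-1]) and B raises ValueError (max of empty set).
def Pre_solution (a : List Int) : Prop := a ≠ []
instance (a : List Int) : Decidable (Pre_solution a) := by unfold Pre_solution; infer_instance
def pvWitness_solution : List Int := [3, 1]
def Spec_solution (a : List Int) (out : Int) : Prop := out = solution_alt a
instance (a : List Int) (out : Int) : Decidable (Spec_solution a out) := by unfold Spec_solution; infer_instance

-- ===== CLAIM (what is proved, stated in full; the proofs are below) =====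
def Claim_equal_solution : Prop := ∀ (a : List Int), Dom_solution a → Pre_solution a → Spec_solution a (solution a)

-- ===== LEMMAS AND PROOFS =====

-- A's loop body as a step function on (current, previous) pairs
def pvStep (acc : Int) (xp : Int × Int) : Int :=
  if xp.1 - 1 ≤ 0 then acc
  else if xp.1 = xp.2 then acc
  else if xp.1 - 1 ≠ xp.2 then xp.1 - 1
  else acc

def pvCond (xp : Int × Int) : Bool :=
  decide (2 ≤ xp.1) && decide (xp.1 ≠ xp.2) && decide (xp.1 - 1 ≠ xp.2)

-- the set of candidate outputs: v - 1 for v ∈ a with v ≥ 2 and v - 1 ∉ a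
def pvC (a : List Int) (c : Int) : Prop := ∃ v, v ∈ a ∧ 2 ≤ v ∧ v - 1 ∉ a ∧ c = v - 1

theorem pvStep_eq (acc : Int) (xp : Int × Int) :
    pvStep acc xp = if pvCond xp then xp.1 - 1 else acc := by
  unfold pvStep pvCond
  split_ifs with h1 h2 h3 h4 h5 h6 <;> simp_all <;> omega

theorem pv_foldl_pvStep (l : List (Int × Int)) (init : Int) :
    l.foldl pvStep init = ((l.filter pvCond).map (fun xp => xp.1 - 1)).getLastD init := by
  induction l generalizing init with
  | nil => rfl
  | cons xp t ih =>
    rw [List.foldl_cons, ih, pvStep_eq]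
    by_cases h : pvCond xp = true
    · rw [if_pos h, List.filter_cons_of_pos h, List.map_cons, List.getLastD_cons]
    · rw [if_neg h, List.filter_cons_of_neg h]

-- monotonicity of indexing in a ≤-sorted list
theorem pv_mono (l : List Int) (hpw : l.Pairwise (· ≤ ·)) :
    ∀ (i j : Nat) (hij : i ≤ j) (hj : j < l.length), l[i]'(by omega) ≤ l[j] := by
  intro i j hij hj
  rcases Nat.eq_or_lt_of_le hij with rfl | hlt
  · exact le_rfl
  · exact (List.pairwise_iff_getElem.mp hpw) i j (by omega) hj hlt

-- in a ≤-sorted nonempty list the last element is maximal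
theorem pv_pw_last (l : List Int) (hpw : l.Pairwise (· ≤ ·)) (h : l ≠ []) :
    ∀ x ∈ l, x ≤ l.getLast h := by
  intro x hx
  obtain ⟨j, hj, rfl⟩ := List.mem_iff_getElem.mp hx
  rw [List.getLast_eq_getElem]
  exact pv_mono l hpw j (l.length - 1) (by omega) (by omega)

-- in a ≤-sorted nonempty list the head is minimal
theorem pv_pw_head (l : List Int) (hpw : l.Pairwise (· ≤ ·)) (h : l ≠ []) :
    ∀ x ∈ l, l[0]'(by simpa [List.length_pos_iff] using h) ≤ x := by
  intro x hx
  obtain ⟨j, hj, rfl⟩ := List.mem_iff_getElem.mp hx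
  exact pv_mono l hpw 0 j (by omega) hj

-- A's index fold equals the fold over (current, previous) pairs
theorem pv_fold_zip (sa : List Int) (h : sa ≠ []) :
    (PySem.List.pyRange 0 (sa.length : Int) 1).foldl
      (fun acc i =>
        if PySem.List.pyGetD sa i 0 - 1 ≤ 0 then acc
        else if PySem.List.pyGetD sa i 0 = PySem.List.pyGetD sa (i - 1) 0 then acc
        else if PySem.List.pyGetD sa i 0 - 1 ≠ PySem.List.pyGetD sa (i - 1) 0 then
          PySem.List.pyGetD sa i 0 - 1
        else acc) 0
    = (sa.zip (sa.getLast h :: sa.dropLast)).foldl pvStep 0 := by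
  have hpos : 0 < sa.length := List.length_pos_iff.mpr h
  have hpslen : (sa.getLast h :: sa.dropLast).length = sa.length := by
    simp [List.length_dropLast]; omega
  have hzlen : (sa.zip (sa.getLast h :: sa.dropLast)).length = sa.length := by
    simp [List.length_zip, hpslen]
  have key : ∀ (acc : Int), ∀ i ∈ PySem.List.pyRange 0 (sa.length : Int) 1,
      (if PySem.List.pyGetD sa i 0 - 1 ≤ 0 then acc
       else if PySem.List.pyGetD sa i 0 = PySem.List.pyGetD sa (i - 1) 0 then acc
       else if PySem.List.pyGetD sa i 0 - 1 ≠ PySem.List.pyGetD sa (i - 1) 0 then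
         PySem.List.pyGetD sa i 0 - 1
       else acc)
      = pvStep acc
          (PySem.List.pyGetD (sa.zip (sa.getLast h :: sa.dropLast)) i ((0 : Int), (0 : Int))) := by
    intro acc i hi
    obtain ⟨h0, hlt⟩ := PySem.List.mem_pyRange_one.mp hi
    have hit : i.toNat < sa.length := by omega
    have hzi : PySem.List.pyGetD (sa.zip (sa.getLast h :: sa.dropLast)) i ((0 : Int), (0 : Int))
        = (sa[i.toNat]'hit, (sa.getLast h :: sa.dropLast)[i.toNat]'(by omega)) := by
      rw [PySem.List.pyGetD_eq_getElem _ _ h0 (by rw [hzlen]; exact hlt)]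
      exact List.getElem_zip
    have hai : PySem.List.pyGetD sa i 0 = sa[i.toNat]'hit :=
      PySem.List.pyGetD_eq_getElem _ _ h0 hlt
    have hap : PySem.List.pyGetD sa (i - 1) 0 = (sa.getLast h :: sa.dropLast)[i.toNat]'(by omega) := by
      rcases eq_or_lt_of_le h0 with heq | hposi
      · subst heq
        norm_num
        rw [PySem.List.pyGetD_neg_one _ _ h]
      · have h1 : (0 : Int) ≤ i - 1 := by omega
        rw [PySem.List.pyGetD_eq_getElem _ _ h1 (by omega)]
        rw [List.getElem_cons, dif_neg (by omega)]
        rw [List.getElem_dropLast]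
        congr 1
        omega
    rw [hzi, hai, hap]
    simp only [pvStep]
  rw [PySem.List.foldl_congr_mem _ _ _ _ key, ← hzlen]
  exact PySem.List.foldl_pyRange_zero_pyGetD' _ _ _ _

-- every value of L is a candidate: v - 1 for some v ∈ sa with v ≥ 2 and v - 1 ∉ sa
theorem pv_L_mem (sa : List Int) (hpw : sa.Pairwise (· ≤ ·)) (hne : sa ≠ [])
    (c : Int)
    (hc : c ∈ ((sa.zip (sa.getLast hne :: sa.dropLast)).filter pvCond).map (fun xp => xp.1 - 1)) :
    pvC sa c := by
  have hpos : 0 < sa.length := List.length_pos_iff.mpr hne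
  obtain ⟨xp, hxf, hxc⟩ := List.mem_map.mp hc
  obtain ⟨hxz, hcond⟩ := List.mem_filter.mp hxf
  obtain ⟨k, hk, hkeq⟩ := List.mem_iff_getElem.mp hxz
  have hklen : k < sa.length := by
    have hlz : (sa.zip (sa.getLast hne :: sa.dropLast)).length = min sa.length (sa.dropLast.length + 1) := by
      simp [List.length_zip]
    rw [hlz, List.length_dropLast] at hk
    omega
  have hxp : xp = (sa[k]'hklen,
      (sa.getLast hne :: sa.dropLast)[k]'(by simp [List.length_dropLast]; omega)) := by
    rw [← hkeq]; exact List.getElem_zip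
  rw [hxp] at hcond hxc
  simp only [pvCond, Bool.and_eq_true, decide_eq_true_eq] at hcond
  obtain ⟨⟨h2, hneq⟩, hneq1⟩ := hcond
  refine ⟨sa[k]'hklen, List.getElem_mem _, h2, ?_, by simpa using hxc.symm⟩
  intro hmem1
  obtain ⟨j, hj, hjeq⟩ := List.mem_iff_getElem.mp hmem1
  rcases Nat.eq_zero_or_pos k with rfl | hk1
  · have hmono := pv_mono sa hpw 0 j (by omega) hj
    omega
  · have hprev : (sa.getLast hne :: sa.dropLast)[k]'(by simp [List.length_dropLast]; omega)
        = sa[k - 1]'(by omega) := by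
      rw [List.getElem_cons, dif_neg (by omega), List.getElem_dropLast]
    rw [hprev] at hneq hneq1
    have hle : sa[k - 1]'(by omega) ≤ sa[k]'hklen := pv_mono sa hpw (k - 1) k (by omega) hklen
    rcases Nat.lt_or_ge j k with hjk | hjk
    · have hjle : sa[j]'hj ≤ sa[k - 1]'(by omega) := pv_mono sa hpw j (k - 1) (by omega) (by omega)
      omega
    · have hkle : sa[k]'hklen ≤ sa[j]'hj := pv_mono sa hpw k j hjk hj
      omega

-- every candidate is in L, provided not all elements are equal
theorem pv_C_mem (sa : List Int) (hpw : sa.Pairwise (· ≤ ·)) (hne : sa ≠ [])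
    (h2 : sa[0]'(List.length_pos_iff.mpr hne) ≠ sa.getLast hne)
    (c : Int) (hc : pvC sa c) :
    c ∈ ((sa.zip (sa.getLast hne :: sa.dropLast)).filter pvCond).map (fun xp => xp.1 - 1) := by
  have hpos : 0 < sa.length := List.length_pos_iff.mpr hne
  obtain ⟨v, hv, hv2, hvnm, rfl⟩ := hc
  have hex : ∃ j, sa[j]? = some v := List.mem_iff_getElem?.mp hv
  obtain ⟨k, hkspec, hmin⟩ : ∃ k, sa[k]? = some v ∧ ∀ j < k, sa[j]? ≠ some v :=
    ⟨Nat.find hex, Nat.find_spec hex, fun j hj => Nat.find_min hex hj⟩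
  obtain ⟨hklen, hkv⟩ := List.getElem?_eq_some_iff.mp hkspec
  have hpsk : k < (sa.getLast hne :: sa.dropLast).length := by
    simp [List.length_dropLast]; omega
  refine List.mem_map.mpr ⟨(sa[k]'hklen, (sa.getLast hne :: sa.dropLast)[k]'hpsk),
    List.mem_filter.mpr ⟨?_, ?_⟩, by rw [hkv]⟩
  · refine List.mem_iff_getElem.mpr ⟨k, by simp [List.length_zip, List.length_dropLast]; omega,
      List.getElem_zip⟩
  · simp only [pvCond, Bool.and_eq_true, decide_eq_true_eq]
    rcases Nat.eq_zero_or_pos k with rfl | hk1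
    · have hps0 : (sa.getLast hne :: sa.dropLast)[0]'hpsk = sa.getLast hne := rfl
      rw [hps0, hkv]
      have hle : v ≤ sa.getLast hne := pv_pw_last sa hpw hne v hv
      refine ⟨⟨hv2, ?_⟩, by omega⟩
      · rw [← hkv]; intro heq; rw [hkv] at heq; rw [← hkv] at heq
        exact h2 (by rw [hkv]; rw [hkv] at heq; exact heq)
    · have hprev : (sa.getLast hne :: sa.dropLast)[k]'hpsk = sa[k - 1]'(by omega) := by
        rw [List.getElem_cons, dif_neg (by omega), List.getElem_dropLast]
      rw [hprev, hkv]
      have hple : sa[k - 1]'(by omega) ≤ v := by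
        have := pv_mono sa hpw (k - 1) k (by omega) hklen
        rw [hkv] at this; exact this
      have hpne : sa[k - 1]'(by omega) ≠ v := by
        intro heq
        exact hmin (k - 1) (by omega) (by rw [List.getElem?_eq_getElem (by omega), heq])
      have hpne1 : sa[k - 1]'(by omega) ≠ v - 1 := by
        intro heq
        exact hvnm (by rw [← heq]; exact List.getElem_mem _)
      exact ⟨⟨hv2, fun heq => hpne heq.symm⟩, fun heq => hpne1 heq.symm⟩

-- L is ≤-sorted (it selects, in order, from the sorted list)
theorem pv_L_pairwise (sa : List Int) (hpw : sa.Pairwise (· ≤ ·)) (hne : sa ≠ []) :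
    (((sa.zip (sa.getLast hne :: sa.dropLast)).filter pvCond).map
      (fun xp => xp.1 - 1)).Pairwise (· ≤ ·) := by
  have hpos : 0 < sa.length := List.length_pos_iff.mpr hne
  have hsub : List.Sublist
      (((sa.zip (sa.getLast hne :: sa.dropLast)).filter pvCond).map
        (fun xp : Int × Int => xp.1 - 1))
      ((sa.zip (sa.getLast hne :: sa.dropLast)).map (fun xp : Int × Int => xp.1 - 1)) :=
    List.filter_sublist.map _
  have hmaps : (sa.zip (sa.getLast hne :: sa.dropLast)).map (fun xp : Int × Int => xp.1 - 1)
      = sa.map (fun v => v - 1) := by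
    have hcomp : (fun xp : Int × Int => xp.1 - 1) = (fun v : Int => v - 1) ∘ Prod.fst := rfl
    rw [hcomp, ← List.map_map, List.map_fst_zip (by simp [List.length_dropLast]; omega)]
  have hpair : ((sa.zip (sa.getLast hne :: sa.dropLast)).map
      (fun xp : Int × Int => xp.1 - 1)).Pairwise (· ≤ ·) := by
    rw [hmaps]
    exact List.pairwise_map.mpr (hpw.imp (by intro a b hab; omega))
  exact hpair.sublist hsub

-- a nodup list that is neither empty nor a singleton contains two different elements
theorem pv_two (l : List Int) (hn : l.Nodup) (h0 : l ≠ []) (h1 : l.length ≠ 1) :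
    ∃ x ∈ l, ∃ y ∈ l, x ≠ y := by
  match l with
  | [] => exact absurd rfl h0
  | [x] => simp at h1
  | x :: y :: t =>
    refine ⟨x, by simp, y, by simp, ?_⟩
    intro heq
    rw [List.nodup_cons] at hn
    exact hn.1 (heq ▸ List.mem_cons_self)

-- the main equivalence
theorem pv_main (a : List Int) (hpre : a ≠ []) : solution a = solution_alt a := by
  simp only [solution, solution_alt]
  set sa := PySem.List.sorted a (fun x => x) false with hsadef
  have hperm : sa.Perm a := PySem.List.sorted_perm a (fun x => x) false
  have hmemsa : ∀ x : Int, x ∈ sa ↔ x ∈ a := fun x => hperm.mem_iff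
  have hpw : sa.Pairwise (· ≤ ·) := by
    simpa using PySem.List.sorted_pairwise a (fun x => x)
  have hne : sa ≠ [] := fun hcon =>
    hpre ((PySem.List.sorted_eq_nil_iff a (fun x => x) false).mp hcon)
  have hpos : 0 < sa.length := List.length_pos_iff.mpr hne
  have hget : PySem.List.pyGet? sa (-1) = some (sa.getLast hne) := by
    rw [PySem.List.pyGet?_neg_one, List.getLast?_eq_getLast]
  rw [hget]
  set s := PySem.Set.ofList a with hsdef
  have hmems : ∀ x : Int, x ∈ s ↔ x ∈ a := fun x => PySem.Set.mem_ofList a x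
  have hsne : s ≠ [] := by
    obtain ⟨x, hx⟩ := List.exists_mem_of_ne_nil a hpre
    exact List.ne_nil_of_mem ((hmems x).mpr hx)
  obtain ⟨m, hm⟩ : ∃ m, PySem.List.max? s (fun x => x) = some m := by
    cases hmm : PySem.List.max? s (fun x => x) with
    | none => exact absurd ((PySem.List.max?_eq_none_iff _ _).mp hmm) hsne
    | some m => exact ⟨m, rfl⟩
  rw [hm]
  dsimp only
  have hmmem : m ∈ a := (hmems m).mp (PySem.List.max?_mem hm)
  have hmmax : ∀ y ∈ a, y ≤ m := fun y hy => PySem.List.max?_isMax hm y ((hmems y).mpr hy)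
  have hml : sa.getLast hne = m :=
    le_antisymm (hmmax _ ((hmemsa _).mp (List.getLast_mem hne)))
      (pv_pw_last sa hpw hne m ((hmemsa m).mpr hmmem))
  by_cases hm0 : m ≤ 0
  · rw [if_pos (hml ▸ hm0), if_pos hm0]
  · rw [if_neg (hml ▸ hm0), if_neg hm0]
    rw [pv_fold_zip sa hne, pv_foldl_pvStep]
    set L := ((sa.zip (sa.getLast hne :: sa.dropLast)).filter pvCond).map
      (fun xp => xp.1 - 1) with hLdef
    set cands := (s.filter fun v => decide (2 ≤ v) && !(PySem.Set.contains s (v - 1))).map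
      (fun v => v - 1) with hcdef
    have hcandmem : ∀ c, c ∈ cands ↔ pvC a c := by
      intro c
      rw [hcdef]
      simp only [List.mem_map, List.mem_filter, Bool.and_eq_true, decide_eq_true_eq,
        Bool.not_eq_true']
      constructor
      · rintro ⟨v, ⟨hvs, h2v, hnc⟩, rfl⟩
        refine ⟨v, (hmems v).mp hvs, h2v, ?_, rfl⟩
        intro hm1
        have hmem : (v - 1) ∈ s := (hmems _).mpr hm1
        rw [← PySem.Set.contains_iff s (v - 1), hnc] at hmem
        cases hmem
      · rintro ⟨v, hva, h2v, hnm, rfl⟩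
        refine ⟨v, ⟨(hmems v).mpr hva, h2v, ?_⟩, rfl⟩
        rw [← Bool.not_eq_true, PySem.Set.contains_iff]
        exact fun hmem => hnm ((hmems _).mp hmem)
    by_cases hone : s.length = 1
    · obtain ⟨x, hx⟩ := List.length_eq_one_iff.mp hone
      have hallx : ∀ y ∈ sa, y = x := by
        intro y hy
        have hys : y ∈ s := (hmems y).mpr ((hmemsa y).mp hy)
        rw [hx] at hys
        simpa using hys
      have hLnil : L = [] := by
        rw [hLdef]
        rw [List.filter_eq_nil_iff.mpr ?_]
        · rfl
        · rintro ⟨x1, x2⟩ hxp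
          have h1 : x1 ∈ sa := (List.of_mem_zip hxp).1
          have h2 : x2 ∈ sa := by
            rcases List.mem_cons.mp (List.of_mem_zip hxp).2 with rfl | h2'
            · exact List.getLast_mem hne
            · exact List.dropLast_subset _ h2'
          have : x1 = x2 := (hallx _ h1).trans (hallx _ h2).symm
          simp [pvCond, this]
      rw [hLnil, if_pos (Or.inl hone)]
      simp [hml]
    · have hnodup : s.Nodup := hsdef ▸ PySem.Set.nodup_ofList a
      obtain ⟨x, hxs, y, hys, hxy⟩ := pv_two s hnodup hsne hone
      have hne2 : sa[0]'hpos ≠ sa.getLast hne := by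
        intro heq
        have h01 : ∀ z ∈ sa, z = sa[0]'hpos := fun z hz =>
          le_antisymm (heq ▸ pv_pw_last sa hpw hne z hz) (pv_pw_head sa hpw hne z hz)
        have hx' : x = sa[0]'hpos := h01 x ((hmemsa x).mpr ((hmems x).mp hxs))
        have hy' : y = sa[0]'hpos := h01 y ((hmemsa y).mpr ((hmems y).mp hys))
        exact hxy (hx'.trans hy'.symm)
      have hLC : ∀ c, c ∈ L ↔ pvC a c := by
        intro c
        constructor
        · intro hc
          obtain ⟨v, hv, h2v, hnm, rfl⟩ := pv_L_mem sa hpw hne c (hLdef ▸ hc)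
          exact ⟨v, (hmemsa v).mp hv, h2v, fun hmm1 => hnm ((hmemsa (v - 1)).mpr hmm1), rfl⟩
        · intro hc
          obtain ⟨v, hva, h2v, hnm, rfl⟩ := hc
          exact hLdef ▸ pv_C_mem sa hpw hne hne2 (v - 1)
            ⟨v, (hmemsa v).mpr hva, h2v, fun hmm1 => hnm ((hmemsa (v - 1)).mp hmm1), rfl⟩
      by_cases hcnil : cands = []
      · have hLnil : L = [] := by
          rw [List.eq_nil_iff_forall_not_mem]
          intro c hc
          have : c ∈ cands := (hcandmem c).mpr ((hLC c).mp hc)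
          rw [hcnil] at this
          simp at this
        rw [hLnil, if_pos (Or.inr hcnil)]
        simp [hml]
      · have hLne : L ≠ [] := by
          obtain ⟨c, hc⟩ := List.exists_mem_of_ne_nil cands hcnil
          exact List.ne_nil_of_mem ((hLC c).mpr ((hcandmem c).mp hc))
        obtain ⟨cmax, hcm⟩ : ∃ cm, PySem.List.max? cands (fun x => x) = some cm := by
          cases hmm : PySem.List.max? cands (fun x => x) with
          | none => exact absurd ((PySem.List.max?_eq_none_iff _ _).mp hmm) hcnil
          | some cm => exact ⟨cm, rfl⟩
        rw [if_neg (show ¬(s.length = 1 ∨ cands = []) by simp [hone, hcnil]), hcm]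
        dsimp only
        have hgd : L.getLastD 0 = L.getLast hLne := by
          rw [List.getLastD_eq_getLast?, List.getLast?_eq_getLast hLne]
          rfl
        rw [hgd]
        obtain ⟨v, hva, h2v, _, hveq⟩ := (hLC _).mp (List.getLast_mem hLne)
        rw [if_neg (by omega : ¬ (L.getLast hLne = 0))]
        have hc1 : cmax ≤ L.getLast hLne :=
          pv_pw_last L (hLdef ▸ pv_L_pairwise sa hpw hne) hLne cmax
            ((hLC cmax).mpr ((hcandmem cmax).mp (PySem.List.max?_mem hcm)))
        have hc2 : L.getLast hLne ≤ cmax :=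
          PySem.List.max?_isMax hcm _ ((hcandmem _).mpr ((hLC _).mp (List.getLast_mem hLne)))
        omega

-- ===== VERDICT (by name: the statement is the Claim_ definition above) =====
theorem solution_spec : Claim_equal_solution := by
  intro a _hdom hpre
  unfold Spec_solution
  exact pv_main a hpre
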